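-- pv_equiv track=rewrite | github.com/hunter-teacher-cert/work-ethics-mrbombmusic | week_01_python/password.py | checkNextDigits
-- ===== SOURCE A (Python) =====
-- def checkNextDigits(num, passcodes):
--     digitsAfter = []
--     containsDigit = False
--     for digit in range(3):
--         if containsDigit:
--             digitsAfter.append(passcodes[digit])
--         if passcodes[digit] == num:
--             containsDigit = True
--     return digitsAfter
-- ===== SOURCE B (Python) =====
-- def checkNextDigits(num, passcodes):
--     window = [passcodes[0], passcodes[1], passcodes[2]]
--     for i in range(3):
--         if window[i] == num:
--             return window[i+1:]
--     return []
-- ===== Notes on version B (the rewrite author's own statement) =====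
-- stated objective: simpler
-- what changed: Replaces the flag-accumulating loop with a find-first-then-slice decomposition: build the three-element window, locate the first element equal to num, and return the slice after it.
import Mathlib
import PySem

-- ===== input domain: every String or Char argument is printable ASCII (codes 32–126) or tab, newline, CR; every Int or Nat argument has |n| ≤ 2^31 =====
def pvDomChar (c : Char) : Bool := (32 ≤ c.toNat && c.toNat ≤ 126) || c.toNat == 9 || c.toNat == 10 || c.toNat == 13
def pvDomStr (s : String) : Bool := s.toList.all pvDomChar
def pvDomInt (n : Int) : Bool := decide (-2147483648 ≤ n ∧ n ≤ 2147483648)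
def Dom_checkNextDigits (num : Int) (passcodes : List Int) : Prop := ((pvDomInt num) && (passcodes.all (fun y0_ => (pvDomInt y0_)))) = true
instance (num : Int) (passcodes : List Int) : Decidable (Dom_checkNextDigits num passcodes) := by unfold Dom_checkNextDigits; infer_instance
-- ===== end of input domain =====

-- B changes the decomposition: it builds the 3-element window first, then finds the
-- first match and returns the slice after it, instead of A's flag-accumulating loop.

-- ===== PORT A =====
-- A's loop over range(3) with state (digitsAfter, containsDigit); passcodes[digit]
-- via pyGet? (IndexError on short lists is excluded by Pre_; .getD 0 only fills the
-- unreachable none case there).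
def pvStepA (num : Int) (passcodes : List Int) (st : List Int × Bool) (digit : Int) : List Int × Bool :=
  let v := (PySem.List.pyGet? passcodes digit).getD 0
  let st := if st.2 then (st.1 ++ [v], st.2) else st
  if v = num then (st.1, true) else st

def checkNextDigits (num : Int) (passcodes : List Int) : List Int :=
  ((PySem.List.pyRange 0 3 1).foldl (pvStepA num passcodes) ([], false)).1

-- ===== PORT B =====
-- B: window of the first three elements (all three accessed), find first index equal
-- to num, return the tail after it; [] if no match.
def checkNextDigits_alt (num : Int) (passcodes : List Int) : List Int :=
  let window := [(PySem.List.pyGet? passcodes 0).getD 0,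
                 (PySem.List.pyGet? passcodes 1).getD 0,
                 (PySem.List.pyGet? passcodes 2).getD 0]
  match window.findIdx? (fun x => x = num) with
  | some i => window.drop (i + 1)
  | none => []

-- ===== PRECONDITION & SPEC =====
-- Pre_: A raises IndexError when the list has fewer than 3 elements.
def Pre_checkNextDigits (num : Int) (passcodes : List Int) : Prop := 3 ≤ passcodes.length
instance (num : Int) (passcodes : List Int) : Decidable (Pre_checkNextDigits num passcodes) := by unfold Pre_checkNextDigits; infer_instance
def pvWitness_checkNextDigits : Int × List Int := (1, [5, 1, 2])

def Spec_checkNextDigits (num : Int) (passcodes : List Int) (out : List Int) : Prop := out = checkNextDigits_alt num passcodes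
instance (num : Int) (passcodes : List Int) (out : List Int) : Decidable (Spec_checkNextDigits num passcodes out) := by unfold Spec_checkNextDigits; infer_instance

-- ===== CLAIM (what is proved, stated in full; the proofs are below) =====
def Claim_equal_checkNextDigits : Prop := ∀ (num : Int) (passcodes : List Int), Dom_checkNextDigits num passcodes → Pre_checkNextDigits num passcodes → Spec_checkNextDigits num passcodes (checkNextDigits num passcodes)

-- ===== LEMMAS AND PROOFS =====

-- ===== VERDICT (by name: the statement is the Claim_ definition above) =====
theorem checkNextDigits_spec : Claim_equal_checkNextDigits := by
  intro num passcodes _ hpre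
  unfold Spec_checkNextDigits Pre_checkNextDigits at *
  match passcodes, hpre with
  | a :: b :: c :: t, _ =>
    have hr : PySem.List.pyRange 0 3 1 = [0, 1, 2] := by decide
    have h0 : PySem.List.pyGet? (a :: b :: c :: t) 0 = some a :=
      PySem.List.pyGet?_zero_cons a (b :: c :: t)
    have h1 : PySem.List.pyGet? (a :: b :: c :: t) 1 = some b := by
      have := PySem.List.pyGet?_ofNat (xs := a :: b :: c :: t) (n := 1) (by simp)
      simpa using this
    have h2 : PySem.List.pyGet? (a :: b :: c :: t) 2 = some c := by
      have := PySem.List.pyGet?_ofNat (xs := a :: b :: c :: t) (n := 2) (by simp)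
      simpa using this
    simp only [checkNextDigits, checkNextDigits_alt, hr, pvStepA, List.foldl,
      h0, h1, h2, Option.getD_some]
    by_cases ha : a = num <;> by_cases hb : b = num <;> by_cases hc : c = num <;>
      simp [ha, hb, hc, List.findIdx?, List.findIdx?.go]
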